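-- pv_equiv track=rewrite | github.com/ekirira22/passing_car_problem | toy_problems/challenge_1.py | solution
-- ===== SOURCE A (Python) =====
-- def solution(A):
--     # Check if each box can hold 10 bricks
--     total_bricks = sum(A)
--     no_of_boxes = len(A)
--     if total_bricks != 10 * len(A):
--         return -1
--
--     # Keep track of the moves
--     moves = 0
--     # iterate over boxes
--     for i in range(no_of_boxes):
--         # check each brick for any deficit or excess
--         if A[i] > 10:
--             excess = A[i] - 10
--             # if any excess move it to the next brick
--             A[i] -= excess
--             A[i+1] += excess
--             moves += excess
--         # do the same for deficit
--         elif A[i] < 10: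
--             deficit = 10 - A[i]
--             # if any deficit bring in difference from next box
--             A[i] += deficit
--             A[i+1] -= deficit
--             moves += deficit
--     return moves
-- ===== SOURCE B (Python) =====
-- def solution(A):
--     # Guard: leveling to 10 each is possible iff total is exactly 10 per box.
--     if sum(A) != 10 * len(A):
--         return -1
--     moves = 0
--     prefix = 0  # running deviation of the prefix from the all-10 target
--     for x in A:
--         prefix += x - 10
--         moves += abs(prefix)
--     # same in-place side effect as A: a valid list always ends as all 10s
--     A[:] = [10] * len(A)
--     return moves
-- ===== Notes on version B (the rewrite author's own statement) =====
-- stated objective: simpler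
-- what changed: Replaces the if/elif neighbour-rewriting loop over indices (which mutates the list as it goes and re-reads the patched values) with a single scalar prefix-deviation accumulator: moves = sum of |prefix_i| where prefix_i = sum(A[:i+1]) - 10*(i+1); the mutation is done once at the end.
import Mathlib
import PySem

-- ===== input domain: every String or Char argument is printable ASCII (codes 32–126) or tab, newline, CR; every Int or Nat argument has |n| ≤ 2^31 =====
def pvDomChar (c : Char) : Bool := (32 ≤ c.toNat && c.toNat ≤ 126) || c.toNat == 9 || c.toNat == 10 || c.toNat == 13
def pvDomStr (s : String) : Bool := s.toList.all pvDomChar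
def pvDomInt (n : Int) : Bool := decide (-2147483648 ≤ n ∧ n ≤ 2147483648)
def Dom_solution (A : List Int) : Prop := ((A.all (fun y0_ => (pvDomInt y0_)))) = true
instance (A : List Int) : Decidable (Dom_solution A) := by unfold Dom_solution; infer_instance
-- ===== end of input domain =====

-- B replaces A's neighbour-rewriting if/elif loop by one prefix-deviation accumulator (simpler);
-- equivalence here is about the RETURN value; in Python both mutate A to all 10s on the valid path.

-- ===== PORT A =====
-- Python's for i in range(no_of_boxes) loop, carrying the mutated list and the move count.
-- Note: Python's `A[i+1] += excess` would raise IndexError when i+1 = n, but that point is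
-- unreachable (the guard forces the last deviation to 0); the port defaults the read to 0 and
-- lets List.set be a no-op there, which changes nothing on any reachable input.
def solutionLoop (A : List Int) (n : Nat) (i : Nat) (moves : Int) : Int :=
  if _h : i < n then
    let ai := (PySem.List.pyGet? A (i : Int)).getD 0
    if ai > 10 then
      let excess := ai - 10
      let A' := (A.set i (ai - excess)).set (i+1) ((PySem.List.pyGet? A ((i:Int)+1)).getD 0 + excess)
      solutionLoop A' n (i+1) (moves + excess)
    else if ai < 10 then
      let deficit := 10 - ai
      let A' := (A.set i (ai + deficit)).set (i+1) ((PySem.List.pyGet? A ((i:Int)+1)).getD 0 - deficit)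
      solutionLoop A' n (i+1) (moves + deficit)
    else
      solutionLoop A n (i+1) moves
  else moves
termination_by n - i

def solution (A : List Int) : Int :=
  let total_bricks := A.sum
  let no_of_boxes := A.length
  if total_bricks ≠ 10 * (A.length : Int) then -1
  else solutionLoop A no_of_boxes 0 0

-- ===== PORT B =====
def solution_alt (A : List Int) : Int :=
  if A.sum ≠ 10 * (A.length : Int) then -1
  else
    (A.foldl (fun (s : Int × Int) x => (s.1 + (x - 10), s.2 + |s.1 + (x - 10)|)) (0, 0)).2

-- ===== PRECONDITION & SPEC =====
def Spec_solution (A : List Int) (out : Int) : Prop := out = solution_alt A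
instance (A : List Int) (out : Int) : Decidable (Spec_solution A out) := by unfold Spec_solution; infer_instance

-- ===== CLAIM (what is proved, stated in full; the proofs are below) =====
def Claim_equal_solution : Prop := ∀ (A : List Int), Dom_solution A → Spec_solution A (solution A)

-- ===== LEMMAS AND PROOFS =====

-- sum of |carry + deviation| along a suffix, with carry c entering from the left
def devSum : List Int → Int → Int
  | [], _ => 0
  | x :: xs, c => |x + c - 10| + devSum xs (x + c - 10)

theorem foldB (xs : List Int) (c m : Int) :
    (xs.foldl (fun (s : Int × Int) x => (s.1 + (x - 10), s.2 + |s.1 + (x - 10)|)) (c, m)).2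
      = m + devSum xs c := by
  induction xs generalizing c m with
  | nil => simp [devSum]
  | cons x xs ih =>
    simp only [List.foldl_cons, devSum, ih]
    ring_nf

theorem loopA (k : Nat) : ∀ (A : List Int) (i : Nat) (moves : Int), k = A.length - i →
    solutionLoop A A.length i moves = moves + devSum (A.drop i) 0 := by
  induction k with
  | zero =>
    intro A i moves hk
    have h : ¬ i < A.length := by omega
    rw [solutionLoop]
    simp [h, List.drop_eq_nil_of_le (by omega : A.length ≤ i), devSum]
  | succ k ih =>
    intro A i moves hk
    have hi : i < A.length := by omega
    have hget : (PySem.List.pyGet? A (i : Int)).getD 0 = A[i] := by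
      simp [PySem.List.pyGet?_natCast, List.getElem?_eq_getElem hi]
    have hdrop : A.drop i = A[i] :: A.drop (i+1) := List.drop_eq_getElem_cons hi
    -- effect of the two writes on the suffix strictly after i
    have hsuffix : ∀ (v w : Int),
        ((A.set i v).set (i+1) w).drop (i+1)
          = (if _ : i+1 < A.length then w :: A.drop (i+2) else []) := by
      intro v w
      by_cases h2 : i + 1 < A.length
      · simp only [h2, dif_pos]
        have := List.drop_eq_getElem_cons (l := (A.set i v).set (i+1) w)
          (i := i+1) (by simpa using h2)
        rw [this]
        congr 1
        · simp
        · ext j x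
          simp only [List.getElem?_drop, List.getElem?_set]
          rw [if_neg (by omega), if_neg (by omega)]
      · have hlen : A.length ≤ i + 1 := by omega
        rw [List.set_eq_of_length_le (by simpa using hlen)]
        simp [List.drop_eq_nil_of_le, hlen, List.length_set]
    have hget1 : ∀ (e : Int),
        devSum ((if _ : i+1 < A.length then
            ((PySem.List.pyGet? A ((i:Int)+1)).getD 0 + e) :: A.drop (i+2) else [])) 0
          = devSum (A.drop (i+1)) e := by
      intro e
      by_cases h2 : i + 1 < A.length
      · have hg : (PySem.List.pyGet? A ((i:Int)+1)).getD 0 = A[i+1] := by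
          rw [show ((i:Int)+1) = ((i+1 : Nat) : Int) by push_cast; ring,
            PySem.List.pyGet?_natCast, List.getElem?_eq_getElem h2, Option.getD_some]
        have hdrop2 : A.drop (i+1) = A[i+1] :: A.drop (i+2) := List.drop_eq_getElem_cons h2
        simp only [h2, dif_pos, hg, hdrop2, devSum]
        ring_nf
      · simp [h2, List.drop_eq_nil_of_le (by omega : A.length ≤ i + 1), devSum]
    rw [solutionLoop]
    simp only [hi, dif_pos, hget]
    by_cases hgt : A[i] > 10
    · simp only [if_pos hgt]
      have hlen' : ((A.set i (A[i] - (A[i] - 10))).set (i+1)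
          ((PySem.List.pyGet? A ((i:Int)+1)).getD 0 + (A[i] - 10))).length = A.length := by simp
      rw [show A.length = ((A.set i (A[i] - (A[i] - 10))).set (i+1)
          ((PySem.List.pyGet? A ((i:Int)+1)).getD 0 + (A[i] - 10))).length from hlen'.symm,
        ih _ (i+1) _ (by simp; omega)]
      rw [hsuffix, hget1, hdrop]
      simp only [devSum]
      rw [show A[i] + 0 - 10 = A[i] - 10 by ring, abs_of_nonneg (by omega)]
      ring
    · simp only [if_neg hgt]
      by_cases hlt : A[i] < 10
      · simp only [if_pos hlt]
        have hlen' : ((A.set i (A[i] + (10 - A[i]))).set (i+1)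
            ((PySem.List.pyGet? A ((i:Int)+1)).getD 0 - (10 - A[i]))).length = A.length := by simp
        rw [show A.length = ((A.set i (A[i] + (10 - A[i]))).set (i+1)
            ((PySem.List.pyGet? A ((i:Int)+1)).getD 0 - (10 - A[i]))).length from hlen'.symm,
          ih _ (i+1) _ (by simp; omega)]
        have : (PySem.List.pyGet? A ((i:Int)+1)).getD 0 - (10 - A[i])
             = (PySem.List.pyGet? A ((i:Int)+1)).getD 0 + (A[i] - 10) := by ring
        rw [this, hsuffix, hget1, hdrop]
        simp only [devSum]
        have habs : |A[i] + 0 - 10| = 10 - A[i] := by rw [abs_of_nonpos (by omega)]; ring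
        have habs' : A[i] + 0 - 10 = A[i] - 10 := by ring
        rw [habs, habs']
        ring
      · have heq : A[i] = 10 := by omega
        simp only [if_neg hlt]
        rw [ih A (i+1) moves (by omega), hdrop]
        simp [devSum, heq]

-- ===== VERDICT (by name: the statement is the Claim_ definition above) =====
theorem solution_spec : Claim_equal_solution := by
  intro A _
  unfold Spec_solution solution solution_alt
  by_cases hg : A.sum = 10 * (A.length : Int)
  · rw [if_neg (by simp [hg]), if_neg (by simp [hg])]
    rw [loopA (A.length - 0) A 0 0 rfl, foldB]
    simp
  · simp [hg]
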